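-- pv_equiv track=rewrite | github.com/surbhiz/Data-Structures | duplicatesOnSegment.py | duplicatesOnSegment
-- ===== SOURCE A (Python) =====
-- def duplicatesOnSegment(arr):
--     total = 0
--     for i in range(0, len(arr)):
--         unique = 0
--         test = {}
--         for j in range(i, len(arr)):
--             k = arr[j]
--             if k not in test:
--                 test[k] = 1
--             else:
--                 test[k] += 1
--
--             if test[k] == 1:
--                 unique += 1
--             elif test[k] == 2:
--                 unique -= 1
--             if unique == 0:
--                 total += 1
--     return total
-- ===== SOURCE B (Python) =====
-- def duplicatesOnSegment(arr):
--     n = len(arr)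
--     total = 0
--     for i in range(0, n):
--         for j in range(i + 1, n + 1):
--             sub = arr[i:j]
--             if all(sub.count(x) >= 2 for x in set(sub)):
--                 total += 1
--     return total
-- ===== Notes on version B (the rewrite author's own statement) =====
-- stated objective: simpler
-- what changed: Replaces A's incremental frequency dict and running 'unique' counter with a plain brute force that recounts each subarray from scratch (all distinct values must occur at least twice).
import Mathlib
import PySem

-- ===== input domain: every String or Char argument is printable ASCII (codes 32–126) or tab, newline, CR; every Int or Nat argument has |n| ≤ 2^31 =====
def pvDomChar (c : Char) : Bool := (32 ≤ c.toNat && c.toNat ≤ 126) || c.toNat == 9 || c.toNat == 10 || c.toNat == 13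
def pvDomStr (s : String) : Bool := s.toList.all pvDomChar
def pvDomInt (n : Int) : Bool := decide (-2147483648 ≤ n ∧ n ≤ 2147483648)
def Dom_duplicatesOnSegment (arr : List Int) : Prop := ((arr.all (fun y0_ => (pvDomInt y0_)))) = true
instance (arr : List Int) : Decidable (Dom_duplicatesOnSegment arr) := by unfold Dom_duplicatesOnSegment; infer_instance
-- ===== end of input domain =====

-- B replaces A's incremental frequency dict and running 'unique' counter with a plain
-- brute force that recounts each subarray from scratch (objective: simpler; not faster).

-- ===== PORT A =====
-- body of A's inner loop, given the current element k = arr[j]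
def aBody (s : Int × PySem.Dict Int Int × Int) (k : Int) : Int × PySem.Dict Int Int × Int :=
  let test := if s.2.1.contains k then s.2.1.modify k 0 (· + 1) else s.2.1.insert k 1
  let unique := if test.getD k 0 = 1 then s.1 + 1
    else if test.getD k 0 = 2 then s.1 - 1 else s.1
  (unique, test, if unique = 0 then s.2.2 + 1 else s.2.2)

def duplicatesOnSegment (arr : List Int) : Int :=
  (PySem.List.pyRange 0 (PySem.List.len arr)).foldl (fun total i =>
    ((PySem.List.pyRange i (PySem.List.len arr)).foldl
      (fun s j => aBody s (PySem.List.pyGetD arr j 0))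
      (0, PySem.Dict.empty, total)).2.2) 0

-- ===== PORT B =====
def duplicatesOnSegment_alt (arr : List Int) : Int :=
  let n := PySem.List.len arr
  (PySem.List.pyRange 0 n).foldl (fun total i =>
    (PySem.List.pyRange (i + 1) (n + 1)).foldl (fun total j =>
      let sub := PySem.List.slice arr (some i) (some j)
      if (PySem.Set.ofList sub).all (fun x => 2 ≤ (sub.count x : Int)) then total + 1
      else total) total) 0

-- ===== PRECONDITION & SPEC =====
def Spec_duplicatesOnSegment (arr : List Int) (out : Int) : Prop := out = duplicatesOnSegment_alt arr
instance (arr : List Int) (out : Int) : Decidable (Spec_duplicatesOnSegment arr out) := by unfold Spec_duplicatesOnSegment; infer_instance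

-- ===== CLAIM (what is proved, stated in full; the proofs are below) =====
def Claim_equal_duplicatesOnSegment : Prop := ∀ (arr : List Int), Dom_duplicatesOnSegment arr → Spec_duplicatesOnSegment arr (duplicatesOnSegment arr)

-- ===== LEMMAS AND PROOFS =====

-- number of values occurring exactly once in p (each such value is hit exactly once by countP over p)
def U (p : List Int) : Int := (p.countP (fun x => p.count x = 1) : Int)

-- the per-i contribution both programs add for start index i
def F (arr : List Int) (i : Int) : Int :=
  (((List.range (arr.drop i.toNat).length).countP
    (fun m => U ((arr.drop i.toNat).take (m + 1)) = 0)) : Int)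

lemma countP_update (p : List Int) (k : Int) (f g : Int → Bool)
    (h : ∀ x, x ≠ k → f x = g x) :
    (p.countP f : Int) = (p.countP g : Int)
      + (p.count k : Int) * ((if f k then 1 else 0) - (if g k then 1 else 0)) := by
  induction p with
  | nil => simp
  | cons a p ih =>
    rw [List.countP_cons, List.countP_cons, List.count_cons]
    by_cases hak : a = k
    · subst hak
      push_cast
      rw [ih]
      by_cases hf : f a <;> by_cases hg : g a <;> simp [hf, hg] <;> ring
    · rw [h a hak]
      push_cast
      rw [ih]
      simp [hak]
      by_cases hg : g a <;> simp [hg] <;> ring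

lemma count_append_singleton (p : List Int) (k x : Int) :
    ((p ++ [k]).count x : Int) = (p.count x : Int) + (if x = k then 1 else 0) := by
  rw [List.count_append]
  by_cases h : x = k
  · subst h; push_cast; simp [List.count_cons]
  · push_cast; simp [List.count_cons, h, show ¬k = x from fun hh => h hh.symm]

lemma U_append (p : List Int) (k : Int) :
    U (p ++ [k]) = if (p.count k : Int) + 1 = 1 then U p + 1
      else if (p.count k : Int) + 1 = 2 then U p - 1 else U p := by
  have hNat : (p ++ [k]).count k = p.count k + 1 := by simp
  have h := countP_update p k (fun x => decide ((p ++ [k]).count x = 1))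
    (fun x => decide (p.count x = 1))
    (fun x hx => by
      have hcnt : (p ++ [k]).count x = p.count x := by
        simp [List.count_append, List.count_cons, show ¬k = x from fun hh => hx hh.symm]
      simp [hcnt])
  unfold U
  rw [List.countP_append, Nat.cast_add, h]
  have hsing : (([k].countP (fun x => decide ((p ++ [k]).count x = 1))) : Int)
      = if p.count k = 0 then 1 else 0 := by
    simp only [List.countP_cons, List.countP_nil, hNat]
    by_cases h0 : p.count k = 0 <;> simp [h0]
  rw [hsing]
  beta_reduce
  simp only [hNat, decide_eq_true_eq]
  split_ifs <;> push_cast at * <;> (try norm_num) <;> omega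

lemma inner_loop (l : List Int) : ∀ (p : List Int) (d : PySem.Dict Int Int) (t : Int),
    (∀ x, d.getD x 0 = (p.count x : Int)) →
    (∀ x, d.contains x = decide (x ∈ p)) →
    (l.foldl aBody (U p, d, t)).2.2
      = t + ((List.range l.length).countP (fun m => U (p ++ l.take (m + 1)) = 0) : Int) := by
  induction l with
  | nil => intro p d t hd hc; simp
  | cons k l ih =>
    intro p d t hd hc
    set test := if d.contains k then d.modify k 0 (· + 1) else d.insert k 1 with htest
    have hk0 : d.contains k = false → p.count k = 0 := by
      intro h
      have := hc k
      rw [h] at this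
      have hmem : k ∉ p := by
        intro hm; simp [hm] at this
      simpa [List.count_eq_zero] using hmem
    have hd' : ∀ x, test.getD x 0 = ((p ++ [k]).count x : Int) := by
      intro x
      rw [count_append_singleton]
      by_cases hk : d.contains k = true
      · rw [htest, if_pos hk, PySem.Dict.getD_modify]
        by_cases hx : x = k <;> simp [hx, hd]
      · rw [htest, if_neg (by simpa using hk), PySem.Dict.getD_insert]
        have h0 := hk0 (by simpa using hk)
        by_cases hx : x = k <;> simp [hx, hd, h0]
    have hc' : ∀ x, test.contains x = decide (x ∈ p ++ [k]) := by
      intro x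
      have : test.contains x = (x == k || d.contains x) := by
        rw [htest]
        by_cases hk : d.contains k = true
        · rw [if_pos hk, PySem.Dict.contains_modify]
        · rw [if_neg (by simpa using hk), PySem.Dict.contains_insert]
      rw [this, hc]
      by_cases hx : x = k <;> by_cases hp : x ∈ p <;> simp [hx, hp]
    have e : test.getD k 0 = (p.count k : Int) + 1 := by
      rw [hd' k, count_append_singleton]
      simp
    have hstep : aBody (U p, d, t) k
        = (U (p ++ [k]), test, if U (p ++ [k]) = 0 then t + 1 else t) := by
      simp only [aBody, ← htest, e]
      rw [← U_append p k]
    rw [List.foldl_cons, hstep, ih (p ++ [k]) test _ hd' hc']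
    have hlen : (k :: l).length = l.length + 1 := rfl
    rw [hlen, List.range_succ_eq_map, List.countP_cons, List.countP_map]
    have hpredeq : ((fun m => decide (U (p ++ List.take (m + 1) (k :: l)) = 0)) ∘ Nat.succ)
        = fun m => decide (U ((p ++ [k]) ++ List.take (m + 1) l) = 0) := by
      funext m
      simp [Function.comp, List.take_succ_cons, List.append_assoc]
    rw [hpredeq]
    by_cases hz : U (p ++ [k]) = 0 <;> simp [hz, List.take_succ_cons] <;> push_cast <;> ring

lemma goodB_iff (s : List Int) :
    ((PySem.Set.ofList s).all (fun x => 2 ≤ (s.count x : Int)) = true) ↔ U s = 0 := by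
  rw [U]
  simp only [List.all_eq_true, PySem.Set.mem_ofList, decide_eq_true_eq, Nat.cast_eq_zero,
    List.countP_eq_zero]
  constructor
  · intro h x hx
    have := h x hx
    omega
  · intro h x hx
    have h1 := h x hx
    have h2 : 0 < s.count x := List.count_pos_iff.2 hx
    omega

lemma a_per_i (arr : List Int) (i t : Int) (hi : 0 ≤ i) :
    ((PySem.List.pyRange i (PySem.List.len arr)).foldl
      (fun s j => aBody s (PySem.List.pyGetD arr j 0))
      (0, PySem.Dict.empty, t)).2.2 = t + F arr i := by
  rw [PySem.List.foldl_pyRange_pyGetD arr 0 aBody (0, PySem.Dict.empty, t) hi]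
  have h := inner_loop (arr.drop i.toNat) [] PySem.Dict.empty t
    (by intro x; simp [PySem.Dict.getD_empty])
    (by intro x; simp [PySem.Dict.contains_empty])
  have hU0 : U [] = (0 : Int) := by simp [U]
  rw [hU0] at h
  simpa [F] using h

lemma b_per_i (arr : List Int) (i t : Int) (hi : 0 ≤ i) (hin : i < PySem.List.len arr) :
    (PySem.List.pyRange (i + 1) (PySem.List.len arr + 1)).foldl (fun total j =>
      let sub := PySem.List.slice arr (some i) (some j)
      if (PySem.Set.ofList sub).all (fun x => 2 ≤ (sub.count x : Int)) then total + 1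
      else total) t = t + F arr i := by
  obtain ⟨i0, rfl⟩ : ∃ i0 : Nat, i = (i0 : Int) := ⟨i.toNat, (Int.toNat_of_nonneg hi).symm⟩
  have hlen : PySem.List.len arr = (arr.length : Int) := rfl
  rw [hlen, PySem.List.pyRange_one]
  have hcnt : ((arr.length : Int) + 1 - ((i0 : Int) + 1)).toNat = arr.length - i0 := by omega
  rw [hcnt, List.foldl_map]
  rw [PySem.List.foldl_congr_mem _ _
    (fun (total : Int) (m : Nat) =>
      if U ((arr.drop i0).take (m + 1)) = 0 then total + 1 else total) t
    (by
      intro acc m _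
      have hidx : (i0 : Int) + 1 + (m : Int) = (i0 : Int) + ((m + 1 : Nat) : Int) := by
        push_cast; ring
      simp only [hidx, PySem.List.slice_natCast_add]
      by_cases hz : U ((arr.drop i0).take (m + 1)) = 0
      · rw [if_pos ((goodB_iff _).2 hz), if_pos hz]
      · rw [if_neg (fun hb => hz ((goodB_iff _).1 hb)), if_neg hz])]
  rw [PySem.List.foldl_ite_add_one]
  have hdl : (arr.drop i0).length = arr.length - i0 := by simp
  simp only [F, Int.toNat_natCast, hdl]
  rfl

-- ===== VERDICT (by name: the statement is the Claim_ definition above) =====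
theorem duplicatesOnSegment_spec : Claim_equal_duplicatesOnSegment := by
  intro arr _
  show duplicatesOnSegment arr = duplicatesOnSegment_alt arr
  have hA : duplicatesOnSegment arr
      = (PySem.List.pyRange 0 (PySem.List.len arr)).foldl
          (fun total i => total + F arr i) 0 := by
    unfold duplicatesOnSegment
    exact PySem.List.foldl_congr_mem _ _ _ 0 (by
      intro acc i hi
      exact a_per_i arr i acc ((PySem.List.mem_pyRange_one).1 hi).1)
  have hB : duplicatesOnSegment_alt arr
      = (PySem.List.pyRange 0 (PySem.List.len arr)).foldl
          (fun total i => total + F arr i) 0 := by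
    show (PySem.List.pyRange 0 (PySem.List.len arr)).foldl (fun total i =>
        (PySem.List.pyRange (i + 1) (PySem.List.len arr + 1)).foldl (fun total j =>
          let sub := PySem.List.slice arr (some i) (some j)
          if (PySem.Set.ofList sub).all (fun x => 2 ≤ (sub.count x : Int)) then total + 1
          else total) total) 0 = _
    exact PySem.List.foldl_congr_mem _ _ _ 0 (by
      intro acc i hi
      have h0 := (PySem.List.mem_pyRange_one).1 hi
      exact b_per_i arr i acc h0.1 h0.2)
  rw [hA, hB]
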